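-- pv_equiv track=rewrite | github.com/patrick-brian-mooney/FourMileFlats | reporter.py | event_count_summary
-- ===== SOURCE A (Python) =====
-- def event_count_summary(daily_data_dict):
--     """Returns a count of how many times each event level was detected."""
--     ret = ""
--     level_counts = dict()
--     for day in daily_data_dict.keys():
--         for event in daily_data_dict[day]['usability_events']:
--             if daily_data_dict[day]['usability_events'][event]['worst_problem'] in level_counts:
--                 level_counts[daily_data_dict[day]['usability_events'][event]['worst_problem']] += 1
--             else:
--                 level_counts[daily_data_dict[day]['usability_events'][event]['worst_problem']] = 1
--     for level in sorted(level_counts.keys()):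
--         ret += "Level %s usability problems: %d\n" % (level, level_counts[level])
--     return ret
-- ===== SOURCE B (Python) =====
-- def event_count_summary(daily_data_dict):
--     """Returns a count of how many times each event level was detected."""
--     levels = sorted(
--         ev['worst_problem']
--         for day_data in daily_data_dict.values()
--         for ev in day_data['usability_events'].values()
--     )
--     groups = []
--     for v in levels:
--         if groups and groups[-1][0] == v:
--             groups[-1] = (v, groups[-1][1] + 1)
--         else:
--             groups.append((v, 1))
--     return "".join("Level %s usability problems: %d\n" % (lv, n) for lv, n in groups)
-- ===== Notes on version B (the rewrite author's own statement) =====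
-- stated objective: alternative
-- what changed: B collects all worst_problem values into one flat list, sorts it, and run-length-groups adjacent equal values to produce each level's line, instead of A's hash-counter dict followed by sorting its keys; Pre_ excludes inputs whose day dicts lack 'usability_events' or whose event dicts lack 'worst_problem' (A raises KeyError there) and assoc lists with duplicate keys in the outer dict or in a usability_events dict, where the assoc-list model of a Python dict is ambiguous (a real Python dict collapses such duplicates).
import Mathlib
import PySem

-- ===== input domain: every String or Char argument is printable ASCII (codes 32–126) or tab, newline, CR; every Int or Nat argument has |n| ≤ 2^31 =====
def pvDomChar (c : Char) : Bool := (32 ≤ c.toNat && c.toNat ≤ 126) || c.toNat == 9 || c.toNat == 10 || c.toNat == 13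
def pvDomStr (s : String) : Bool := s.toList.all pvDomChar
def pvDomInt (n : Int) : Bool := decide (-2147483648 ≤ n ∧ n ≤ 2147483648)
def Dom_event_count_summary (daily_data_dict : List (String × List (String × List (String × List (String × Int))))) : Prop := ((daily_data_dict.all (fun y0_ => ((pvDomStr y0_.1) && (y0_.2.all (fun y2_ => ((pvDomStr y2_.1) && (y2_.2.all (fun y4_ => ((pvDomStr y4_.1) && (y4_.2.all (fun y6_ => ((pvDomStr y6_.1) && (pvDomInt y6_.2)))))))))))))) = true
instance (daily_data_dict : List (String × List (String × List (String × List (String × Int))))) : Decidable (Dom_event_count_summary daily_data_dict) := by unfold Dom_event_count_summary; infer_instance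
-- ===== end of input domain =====

-- B replaces A's hash-counter-then-sort-keys aggregation by sort-all-values-then-run-length-group; equal output proved on Pre_.

-- ===== PORT A =====
-- shared by both ports: "Level %s usability problems: %d\n" % (level, count)
def fmtLine (level : Int) (count : Int) : String :=
  "Level " ++ PySem.Int.toStr level ++ " usability problems: " ++ PySem.Int.toStr count ++ "\n"

def event_count_summary (daily_data_dict : List (String × List (String × List (String × List (String × Int))))) : String :=
  let level_counts : PySem.Dict Int Int :=
    (PySem.Dict.keys (PySem.Dict.mk daily_data_dict)).foldl (fun lc day =>
      match PySem.Dict.get? (PySem.Dict.mk daily_data_dict) day with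
      | none => lc  -- unreachable: day ∈ keys
      | some dayData =>
        match PySem.Dict.get? (PySem.Dict.mk dayData) "usability_events" with
        | none => lc  -- KeyError: excluded by Pre_
        | some events =>
          (PySem.Dict.keys (PySem.Dict.mk events)).foldl (fun lc event =>
            match PySem.Dict.get? (PySem.Dict.mk events) event with
            | none => lc  -- unreachable: event ∈ keys
            | some evData =>
              match PySem.Dict.get? (PySem.Dict.mk evData) "worst_problem" with
              | none => lc  -- KeyError: excluded by Pre_
              | some wp =>
                if PySem.Dict.contains lc wp then
                  PySem.Dict.insert lc wp (PySem.Dict.getD lc wp 0 + 1)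
                else
                  PySem.Dict.insert lc wp 1) lc) PySem.Dict.empty
  (PySem.List.sorted (PySem.Dict.keys level_counts) (fun x => x) false).foldl
    (fun ret level =>
      match PySem.Dict.get? level_counts level with
      | none => ret  -- unreachable: level ∈ keys
      | some c => ret ++ fmtLine level c) ""

-- ===== PORT B =====

def event_count_summary_alt (daily_data_dict : List (String × List (String × List (String × List (String × Int))))) : String :=
  let levels : List Int := daily_data_dict.flatMap (fun dayPair =>
    match PySem.Dict.get? (PySem.Dict.mk dayPair.2) "usability_events" with
    | none => []  -- KeyError: excluded by Pre_
    | some evs => evs.flatMap (fun evPair =>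
        match PySem.Dict.get? (PySem.Dict.mk evPair.2) "worst_problem" with
        | none => []  -- KeyError: excluded by Pre_
        | some wp => [wp]))
  let sortedLevels := PySem.List.sorted levels (fun x => x) false
  let groups : List (Int × Int) := sortedLevels.foldl (fun gs v =>
    match gs.getLast? with
    | some g => if g.1 = v then gs.dropLast ++ [(v, g.2 + 1)] else gs ++ [(v, 1)]
    | none => gs ++ [(v, 1)]) []
  PySem.Str.join "" (groups.map (fun g => fmtLine g.1 g.2))

-- ===== PRECONDITION & SPEC =====
-- per-day check: the day dict has a 'usability_events' entry whose event dict has no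
-- duplicate keys, and every event dict has a 'worst_problem' entry
def pvPreDay (dayData : List (String × List (String × List (String × Int)))) : Bool :=
  match PySem.Dict.get? (PySem.Dict.mk dayData) "usability_events" with
  | none => false
  | some evs =>
    decide (evs.map Prod.fst).Nodup &&
    evs.all (fun evPair => PySem.Dict.contains (PySem.Dict.mk evPair.2) "worst_problem")

-- Pre_ excludes (a) inputs on which A raises KeyError (a day dict without 'usability_events',
-- an event dict without 'worst_problem'), and (b) association lists with duplicate keys in the
-- outer dict or in a usability_events dict, where the assoc-list model of a Python dict is
-- ambiguous (a real Python dict collapses such duplicates before either function runs).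
def Pre_event_count_summary (daily_data_dict : List (String × List (String × List (String × List (String × Int))))) : Prop :=
  (daily_data_dict.map Prod.fst).Nodup ∧ ∀ p ∈ daily_data_dict, pvPreDay p.2 = true
instance (daily_data_dict : List (String × List (String × List (String × List (String × Int))))) : Decidable (Pre_event_count_summary daily_data_dict) := by unfold Pre_event_count_summary; infer_instance

def pvWitness_event_count_summary : (List (String × List (String × List (String × List (String × Int))))) :=
  [("mon", [("usability_events", [("e1", [("worst_problem", 2)]), ("e2", [("worst_problem", 1)])])]),
   ("tue", [("usability_events", [("e1", [("worst_problem", 2)])])])]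

def Spec_event_count_summary (daily_data_dict : List (String × List (String × List (String × List (String × Int))))) (out : String) : Prop := out = event_count_summary_alt daily_data_dict
instance (daily_data_dict : List (String × List (String × List (String × List (String × Int))))) (out : String) : Decidable (Spec_event_count_summary daily_data_dict out) := by unfold Spec_event_count_summary; infer_instance

-- ===== CLAIM (what is proved, stated in full; the proofs are below) =====
def Claim_equal_event_count_summary : Prop := ∀ (daily_data_dict : List (String × List (String × List (String × List (String × Int))))), Dom_event_count_summary daily_data_dict → Pre_event_count_summary daily_data_dict → Spec_event_count_summary daily_data_dict (event_count_summary daily_data_dict)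

-- ===== LEMMAS AND PROOFS =====

-- the flat list of worst_problem values, one per event (B's `levels` before sorting)
def pvValsDay (dayData : List (String × List (String × List (String × Int)))) : List Int :=
  match PySem.Dict.get? (PySem.Dict.mk dayData) "usability_events" with
  | none => []
  | some evs => evs.flatMap (fun evPair =>
      match PySem.Dict.get? (PySem.Dict.mk evPair.2) "worst_problem" with
      | none => []
      | some wp => [wp])

def pvVals (ddd : List (String × List (String × List (String × List (String × Int))))) : List Int :=
  ddd.flatMap (fun dayPair => pvValsDay dayPair.2)

-- B's run-length-grouping loop body
def pvStep (gs : List (Int × Int)) (v : Int) : List (Int × Int) :=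
  match gs.getLast? with
  | some g => if g.1 = v then gs.dropLast ++ [(v, g.2 + 1)] else gs ++ [(v, 1)]
  | none => gs ++ [(v, 1)]

-- ---- A's side: the dict after the double loop is Counter(pvVals) ----

theorem pv_step_eq (lc : PySem.Dict Int Int) (wp : Int) :
    (if PySem.Dict.contains lc wp then
      PySem.Dict.insert lc wp (PySem.Dict.getD lc wp 0 + 1)
    else
      PySem.Dict.insert lc wp 1)
    = PySem.Dict.insert lc wp (PySem.Dict.getD lc wp 0 + 1) := by
  split_ifs with h
  · rfl
  · rw [PySem.Dict.getD_of_not_contains (h := by simpa using h)]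
    norm_num

theorem pv_day_fold (events : List (String × List (String × Int)))
    (hnd : (events.map Prod.fst).Nodup)
    (hwp : ∀ ep ∈ events, PySem.Dict.contains (PySem.Dict.mk ep.2) "worst_problem" = true)
    (lc : PySem.Dict Int Int) :
    (PySem.Dict.keys (PySem.Dict.mk events)).foldl (fun lc event =>
      match PySem.Dict.get? (PySem.Dict.mk events) event with
      | none => lc
      | some evData =>
        match PySem.Dict.get? (PySem.Dict.mk evData) "worst_problem" with
        | none => lc
        | some wp =>
          if PySem.Dict.contains lc wp then
            PySem.Dict.insert lc wp (PySem.Dict.getD lc wp 0 + 1)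
          else
            PySem.Dict.insert lc wp 1) lc
    = (events.flatMap (fun evPair =>
        match PySem.Dict.get? (PySem.Dict.mk evPair.2) "worst_problem" with
        | none => []
        | some wp => [wp])).foldl (fun d x => PySem.Dict.insert d x (PySem.Dict.getD d x 0 + 1)) lc := by
  show (events.map Prod.fst).foldl _ lc = _
  rw [List.foldl_map, List.foldl_flatMap]
  apply PySem.List.foldl_congr_mem'
  intro ep hep acc
  rw [PySem.Dict.get?_of_mem_items (PySem.Dict.mk events) hep hnd]
  dsimp only
  have hc := hwp ep hep
  rw [PySem.Dict.contains_eq_isSome_get?] at hc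
  cases hg : PySem.Dict.get? (PySem.Dict.mk ep.2) "worst_problem" with
  | none => rw [hg] at hc; simp at hc
  | some wp => simp [pv_step_eq]

theorem pv_counts_eq (ddd : List (String × List (String × List (String × List (String × Int)))))
    (hnd : (ddd.map Prod.fst).Nodup) (hday : ∀ p ∈ ddd, pvPreDay p.2 = true) :
    (PySem.Dict.keys (PySem.Dict.mk ddd)).foldl (fun lc day =>
      match PySem.Dict.get? (PySem.Dict.mk ddd) day with
      | none => lc
      | some dayData =>
        match PySem.Dict.get? (PySem.Dict.mk dayData) "usability_events" with
        | none => lc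
        | some events =>
          (PySem.Dict.keys (PySem.Dict.mk events)).foldl (fun lc event =>
            match PySem.Dict.get? (PySem.Dict.mk events) event with
            | none => lc
            | some evData =>
              match PySem.Dict.get? (PySem.Dict.mk evData) "worst_problem" with
              | none => lc
              | some wp =>
                if PySem.Dict.contains lc wp then
                  PySem.Dict.insert lc wp (PySem.Dict.getD lc wp 0 + 1)
                else
                  PySem.Dict.insert lc wp 1) lc) (PySem.Dict.empty : PySem.Dict Int Int)
    = PySem.Dict.counter (pvVals ddd) := by
  rw [← PySem.Dict.foldl_insert_getD_add_one_eq_counter]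
  show (ddd.map Prod.fst).foldl _ _ = _
  rw [List.foldl_map]
  unfold pvVals
  rw [List.foldl_flatMap]
  apply PySem.List.foldl_congr_mem'
  intro dp hdp acc
  rw [PySem.Dict.get?_of_mem_items (PySem.Dict.mk ddd) hdp hnd]
  dsimp only
  have hpd := hday dp hdp
  unfold pvPreDay at hpd
  unfold pvValsDay
  cases hue : PySem.Dict.get? (PySem.Dict.mk dp.2) "usability_events" with
  | none => rw [hue] at hpd; simp at hpd
  | some evs =>
    rw [hue] at hpd
    simp only [Bool.and_eq_true, decide_eq_true_eq, List.all_eq_true] at hpd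
    exact pv_day_fold evs hpd.1 (fun ep hep => hpd.2 ep hep) acc

-- ---- B's side: run-length grouping of a sorted list ----

theorem pvStep_ne_nil (gs : List (Int × Int)) (v : Int) : pvStep gs v ≠ [] := by
  unfold pvStep
  cases h : gs.getLast? with
  | none => simp
  | some g => dsimp only; split_ifs <;> simp

theorem pvStep_append (gs g : List (Int × Int)) (hg : g ≠ []) (v : Int) :
    pvStep (gs ++ g) v = gs ++ pvStep g v := by
  unfold pvStep
  rw [List.getLast?_append_of_ne_nil gs hg, List.dropLast_append_of_ne_nil hg]
  cases g.getLast? with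
  | none => simp
  | some p => dsimp only; split_ifs <;> simp

theorem pv_foldl_step_append (s : List Int) : ∀ (gs g : List (Int × Int)), g ≠ [] →
    s.foldl pvStep (gs ++ g) = gs ++ s.foldl pvStep g := by
  induction s with
  | nil => intro gs g hg; simp
  | cons v t ih =>
    intro gs g hg
    simp only [List.foldl_cons]
    rw [pvStep_append gs g hg v, ih gs _ (pvStep_ne_nil g v)]

theorem pv_run (t : List Int) : ∀ (v n : Int), t.Pairwise (· ≤ ·) → (∀ x ∈ t, v ≤ x) →
    t.foldl pvStep [(v, n)] =
      (v, n + (t.count v : Int)) ::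
        (PySem.Set.discard (PySem.Set.ofList t) v).map (fun k => (k, (t.count k : Int))) := by
  induction t with
  | nil => intro v n _ _; simp [PySem.Set.ofList, PySem.Set.discard]
  | cons x r ih =>
    intro v n hp hv
    have hxr : ∀ y ∈ r, x ≤ y := (List.pairwise_cons.mp hp).1
    have hpr : r.Pairwise (· ≤ ·) := (List.pairwise_cons.mp hp).2
    simp only [List.foldl_cons]
    by_cases hxv : v = x
    · subst hxv
      have hstep : pvStep [(v, n)] v = [(v, n + 1)] := by simp [pvStep]
      rw [hstep, ih v (n + 1) hpr hxr]
      have hcnt : ((v :: r).count v : Int) = (r.count v : Int) + 1 := by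
        rw [List.count_cons_self]; push_cast; ring
      rw [hcnt]
      congr 1
      · ring_nf
      · rw [PySem.Set.ofList_cons]
        show _ = (PySem.Set.discard (v :: PySem.Set.discard (PySem.Set.ofList r) v) v).map _
        have hd : PySem.Set.discard (v :: PySem.Set.discard (PySem.Set.ofList r) v) v
            = PySem.Set.discard (PySem.Set.ofList r) v := by
          show List.filter _ _ = _
          simp
        rw [hd]
        apply List.map_congr_left
        intro k hk
        have hkv : k ≠ v := ((PySem.Set.mem_discard _ _ _).mp hk).2
        simp [Ne.symm hkv]
    · have hvx : v < x := lt_of_le_of_ne (hv x (by simp)) hxv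
      have hstep : pvStep [(v, n)] x = [(v, n), (x, 1)] := by
        simp [pvStep, hxv]
      have hvr : v ∉ r := fun hmem => absurd (lt_of_lt_of_le hvx (hxr v hmem)) (lt_irrefl v)
      rw [hstep]
      rw [show [(v, n), (x, 1)] = [(v, n)] ++ [(x, 1)] from rfl]
      rw [pv_foldl_step_append r [(v, n)] [(x, 1)] (by simp)]
      rw [ih x 1 hpr hxr]
      have hcnt0 : ((x :: r).count v : Int) = 0 := by
        have hnm : v ∉ x :: r := by
          intro hm
          rcases List.mem_cons.mp hm with h1 | h1
          · exact hxv h1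
          · exact hvr h1
        simp [List.count_eq_zero.mpr hnm]
      rw [hcnt0]
      have hset : PySem.Set.discard (PySem.Set.ofList (x :: r)) v
          = x :: PySem.Set.discard (PySem.Set.ofList r) x := by
        rw [PySem.Set.ofList_cons]
        show List.filter _ _ = _
        rw [List.filter_cons]
        have hxvb : (!(x == v)) = true := by simp [Ne.symm hxv]
        rw [if_pos hxvb]
        congr 1
        show List.filter _ (PySem.Set.discard (PySem.Set.ofList r) x) = _
        apply List.filter_eq_self.mpr
        intro a ha
        have hao : a ∈ PySem.Set.ofList r := ((PySem.Set.mem_discard _ _ _).mp ha).1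
        have har : a ∈ r := (PySem.Set.mem_ofList _ _).mp hao
        have hva : v < a := lt_of_lt_of_le hvx (hxr a har)
        simp [ne_of_gt hva]
      rw [hset]
      simp only [List.map_cons, List.cons_append, List.nil_append]
      refine congrArg₂ _ (by norm_num) (congrArg₂ _ ?_ ?_)
      · congr 1
        rw [List.count_cons_self]; push_cast; ring
      · apply List.map_congr_left
        intro k hk
        have hkx : k ≠ x := ((PySem.Set.mem_discard _ _ _).mp hk).2
        simp [Ne.symm hkx]

theorem pv_groups_eq (s : List Int) (hs : s.Pairwise (· ≤ ·)) :
    s.foldl pvStep ([] : List (Int × Int))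
    = (PySem.Set.ofList s).map (fun k => (k, (s.count k : Int))) := by
  cases s with
  | nil => rfl
  | cons v t =>
    have hvt : ∀ x ∈ t, v ≤ x := (List.pairwise_cons.mp hs).1
    have hpt : t.Pairwise (· ≤ ·) := (List.pairwise_cons.mp hs).2
    simp only [List.foldl_cons]
    have h1 : pvStep [] v = [(v, 1)] := rfl
    rw [h1, pv_run t v 1 hpt hvt]
    rw [PySem.Set.ofList_cons]
    simp only [List.map_cons]
    congr 1
    · rw [List.count_cons_self]; push_cast; ring_nf
    · apply List.map_congr_left
      intro k hk
      have hkv : k ≠ v := ((PySem.Set.mem_discard _ _ _).mp hk).2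
      simp [Ne.symm hkv]

-- ---- bridging the two orders and the output strings ----

theorem pv_ofList_sublist (l : List Int) : (PySem.Set.ofList l).Sublist l := by
  induction l with
  | nil => simp [PySem.Set.ofList]
  | cons x xs ih =>
    rw [PySem.Set.ofList_cons]
    exact List.Sublist.cons₂ x ((List.filter_sublist).trans ih)

theorem pv_keys_bridge (vals : List Int) :
    PySem.List.sorted (PySem.Set.ofList vals) (fun x => x) false
    = PySem.Set.ofList (PySem.List.sorted vals (fun x => x) false) := by
  apply PySem.List.sorted_eq_of_perm_of_pairwise_lt
  · apply (List.perm_ext_iff_of_nodup (PySem.Set.nodup_ofList _) (PySem.Set.nodup_ofList _)).mpr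
    intro a
    rw [PySem.Set.mem_ofList, PySem.Set.mem_ofList, PySem.List.mem_sorted]
  · have hsub := pv_ofList_sublist (PySem.List.sorted vals (fun x => x) false)
    have hle : (PySem.Set.ofList (PySem.List.sorted vals (fun x => x) false)).Pairwise (· ≤ ·) := by
      apply List.Pairwise.sublist hsub
      have := PySem.List.sorted_pairwise vals (fun x => x)
      simpa using this
    have hnd := PySem.Set.nodup_ofList (PySem.List.sorted vals (fun x => x) false)
    have hne : (PySem.Set.ofList (PySem.List.sorted vals (fun x => x) false)).Pairwise (· ≠ ·) := hnd
    have hlt := hle.and hne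
    apply hlt.imp
    intro a b hab
    exact lt_of_le_of_ne hab.1 hab.2

theorem pv_get?_counter (vals : List Int) (level : Int) (h : level ∈ PySem.Set.ofList vals) :
    PySem.Dict.get? (PySem.Dict.counter vals) level = some (vals.count level : Int) := by
  apply PySem.Dict.get?_of_mem_items
  · rw [PySem.Dict.items_counter]
    exact List.mem_map.mpr ⟨level, h, rfl⟩
  · exact PySem.Dict.nodup_keys_counter vals

theorem pv_join_cons (x : String) (parts : List String) :
    PySem.Str.join "" (x :: parts) = x ++ PySem.Str.join "" parts := by
  apply String.toList_inj.mp
  rw [String.toList_append, PySem.Str.toList_join, PySem.Str.toList_join]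
  simp only [List.map_cons]
  have h0 : ("" : String).toList = [] := rfl
  rw [h0]
  cases hm : parts.map String.toList with
  | nil => simp [PySem.Chars.join_nil, PySem.Chars.join_singleton]
  | cons c rest => rw [PySem.Chars.join_cons_cons]; simp

theorem pv_foldl_join (K : List Int) (f : Int → String) : ∀ (acc : String),
    K.foldl (fun r k => r ++ f k) acc = acc ++ PySem.Str.join "" (K.map f) := by
  induction K with
  | nil =>
    intro acc
    have h0 : PySem.Str.join "" ([] : List String) = "" := rfl
    simp [h0]
  | cons k t ih =>
    intro acc
    simp only [List.foldl_cons, List.map_cons]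
    rw [ih (acc ++ f k), pv_join_cons, ← String.append_assoc]

theorem pv_outA (vals : List Int) :
    (PySem.List.sorted (PySem.Set.ofList vals) (fun x => x) false).foldl
      (fun ret level =>
        match PySem.Dict.get? (PySem.Dict.counter vals) level with
        | none => ret
        | some c => ret ++ fmtLine level c) ""
    = PySem.Str.join "" ((PySem.Set.ofList (PySem.List.sorted vals (fun x => x) false)).map
        (fun k => fmtLine k (vals.count k : Int))) := by
  rw [pv_keys_bridge]
  have hb : (PySem.Set.ofList (PySem.List.sorted vals (fun x => x) false)).foldl
      (fun ret level =>
        match PySem.Dict.get? (PySem.Dict.counter vals) level with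
        | none => ret
        | some c => ret ++ fmtLine level c) ""
      = (PySem.Set.ofList (PySem.List.sorted vals (fun x => x) false)).foldl
        (fun ret level => ret ++ fmtLine level (vals.count level : Int)) "" := by
    apply PySem.List.foldl_congr_mem'
    intro level hlev acc
    have hmem : level ∈ PySem.Set.ofList vals := by
      rw [PySem.Set.mem_ofList]
      have h1 := (PySem.Set.mem_ofList _ _).mp hlev
      exact (PySem.List.mem_sorted _ _ _ _).mp h1
    rw [pv_get?_counter vals level hmem]
  rw [hb, pv_foldl_join]
  rw [String.empty_append]

theorem pv_sorted_pairwise_le (vals : List Int) :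
    (PySem.List.sorted vals (fun x => x) false).Pairwise (· ≤ ·) := by
  have := PySem.List.sorted_pairwise vals (fun x => x)
  simpa using this

-- ===== VERDICT (by name: the statement is the Claim_ definition above) =====
theorem event_count_summary_spec : Claim_equal_event_count_summary := by
  intro ddd _ hpre
  obtain ⟨hnd, hday⟩ := hpre
  unfold Spec_event_count_summary event_count_summary event_count_summary_alt
  dsimp only
  rw [pv_counts_eq ddd hnd hday]
  rw [PySem.Dict.keys_counter]
  rw [pv_outA (pvVals ddd)]
  have hlev : (ddd.flatMap (fun dayPair =>
      match PySem.Dict.get? (PySem.Dict.mk dayPair.2) "usability_events" with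
      | none => []
      | some evs => evs.flatMap (fun evPair =>
          match PySem.Dict.get? (PySem.Dict.mk evPair.2) "worst_problem" with
          | none => []
          | some wp => [wp]))) = pvVals ddd := by
    unfold pvVals pvValsDay
    rfl
  rw [hlev]
  have hstep : (fun (gs : List (Int × Int)) (v : Int) =>
      match gs.getLast? with
      | some g => if g.1 = v then gs.dropLast ++ [(v, g.2 + 1)] else gs ++ [(v, 1)]
      | none => gs ++ [(v, 1)]) = pvStep := rfl
  rw [hstep]
  rw [pv_groups_eq _ (pv_sorted_pairwise_le (pvVals ddd))]
  rw [List.map_map]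
  have hcong : ((PySem.Set.ofList (PySem.List.sorted (pvVals ddd) (fun x => x) false)).map
      ((fun g : Int × Int => fmtLine g.1 g.2) ∘ fun k => (k, ((PySem.List.sorted (pvVals ddd) (fun x => x) false).count k : Int))))
      = (PySem.Set.ofList (PySem.List.sorted (pvVals ddd) (fun x => x) false)).map
        (fun k => fmtLine k ((pvVals ddd).count k : Int)) := by
    apply List.map_congr_left
    intro k _
    have hcnt : (PySem.List.sorted (pvVals ddd) (fun x => x) false).count k = (pvVals ddd).count k :=
      (PySem.List.sorted_perm (pvVals ddd) (fun x => x) false).count_eq k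
    simp only [Function.comp, hcnt]
  rw [hcong]
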